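-- pv_equiv track=rewrite | github.com/JATAYU000/DeluluVoice | model/tokenizer.py | clean_g2p_tokens
-- ===== SOURCE A (Python) =====
-- def clean_g2p_tokens(raw_tokens):
--     """
--     Cleans raw g2p_en output by removing garbage tokens, fixing space
--     alignment around punctuation, and applying explicit <TAGS>.
--     """
--     cleaned_vector = []
--
--     symbol_map = {
--         ' ': '<SPACE>',
--         ',': '<COMMA>',
--         '.': '<PERIOD>',
--         '?': '<QUESTION>',
--         '!': '<EXCLAMATION>',
--         '\n': '<NEWLINE>'
--     }
--
--     ignore_list = ["'", '"', '-', ':', ';']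
--
--     for token in raw_tokens:
--         if token in ignore_list:
--             continue
--
--         if token in symbol_map:
--             mapped_token = symbol_map[token]
--
--             if mapped_token == '<SPACE>' and (not cleaned_vector or cleaned_vector[-1] == '<SPACE>'):
--                 continue
--
--             if mapped_token in ['<COMMA>', '<PERIOD>', '<QUESTION>', '<EXCLAMATION>']:
--                 if cleaned_vector and cleaned_vector[-1] == '<SPACE>':
--                     cleaned_vector.pop()
--
--             cleaned_vector.append(mapped_token)
--         else:
--             cleaned_vector.append(token)
--
--     if cleaned_vector and cleaned_vector[-1] == '<SPACE>':
--         cleaned_vector.pop()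
--
--     return cleaned_vector
-- ===== SOURCE B (Python) =====
-- def clean_g2p_tokens(raw_tokens):
--     SYMBOL_MAP = {
--         ' ': '<SPACE>',
--         ',': '<COMMA>',
--         '.': '<PERIOD>',
--         '?': '<QUESTION>',
--         '!': '<EXCLAMATION>',
--         '\n': '<NEWLINE>'
--     }
--     IGNORE = ("'", '"', '-', ':', ';')
--     PUNCT = ('<COMMA>', '<PERIOD>', '<QUESTION>', '<EXCLAMATION>')
--
--     # stage 1: drop ignored tokens, remap symbols, tag the remapped ones
--     tagged = [(SYMBOL_MAP.get(t, t), t in SYMBOL_MAP)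
--               for t in raw_tokens if t not in IGNORE]
--
--     # stage 2: decide which tokens are emitted at all; the only state
--     # kept is the value of the most recently emitted token
--     emitted = []
--     last = None
--     for val, mapped in tagged:
--         if mapped and val == '<SPACE>' and (last is None or last == '<SPACE>'):
--             continue
--         emitted.append((val, mapped))
--         last = val
--
--     # stage 3: pop-free spacing normalization: each '<SPACE>' is held back
--     # and only released once the next token shows it is not followed by a
--     # remapped punctuation tag; a space still pending at the end is dropped
--     result = []
--     pending = None
--     for val, mapped in emitted:
--         if pending is not None and not (mapped and val in PUNCT):
--             result.append(pending)
--         pending = None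
--         if val == '<SPACE>':
--             pending = val
--         else:
--             result.append(val)
--     return result
-- ===== Notes on version B (the rewrite author's own statement) =====
-- stated objective: alternative
-- what changed: B replaces A's mutate-and-pop vector by a pop-free three-stage pipeline: remap/filter, emission decision tracking only the last emitted value, and a delayed-emission pass that holds each '<SPACE>' back until the next token shows it is not followed by remapped punctuation (a pending space at the end is simply dropped), so the output list is only ever appended to.
import Mathlib
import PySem

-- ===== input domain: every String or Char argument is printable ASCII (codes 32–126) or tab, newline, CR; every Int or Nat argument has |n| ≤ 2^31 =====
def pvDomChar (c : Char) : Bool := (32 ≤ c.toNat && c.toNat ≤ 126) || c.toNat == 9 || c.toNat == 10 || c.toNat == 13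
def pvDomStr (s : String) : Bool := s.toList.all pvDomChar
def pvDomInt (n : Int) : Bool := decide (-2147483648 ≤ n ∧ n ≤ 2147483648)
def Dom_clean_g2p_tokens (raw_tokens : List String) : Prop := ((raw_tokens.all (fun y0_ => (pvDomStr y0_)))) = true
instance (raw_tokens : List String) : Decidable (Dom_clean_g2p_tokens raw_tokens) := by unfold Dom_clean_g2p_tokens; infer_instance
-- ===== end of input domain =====

-- B replaces A's mutate-and-pop loop by a pop-free three-stage pipeline (remap/filter,
-- emission decision, delayed release of held-back spaces); same cost, alternative structure.

-- ===== PORT A =====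
def pvSymbolMap : PySem.Dict String String :=
  PySem.Dict.ofList [(" ", "<SPACE>"), (",", "<COMMA>"), (".", "<PERIOD>"),
    ("?", "<QUESTION>"), ("!", "<EXCLAMATION>"), ("\n", "<NEWLINE>")]

def pvIgnoreList : List String := ["'", "\"", "-", ":", ";"]

-- loop body of A; cleaned_vector[-1] under the nonemptiness guard is getLast?
def pvAStep (acc : List String) (token : String) : List String :=
  if token ∈ pvIgnoreList then acc
  else
    match pvSymbolMap.get? token with
    | some mapped =>
      if mapped = "<SPACE>" ∧ (acc = [] ∨ acc.getLast? = some "<SPACE>") then acc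
      else
        let acc' := if mapped ∈ ["<COMMA>", "<PERIOD>", "<QUESTION>", "<EXCLAMATION>"]
                      ∧ acc ≠ [] ∧ acc.getLast? = some "<SPACE>" then acc.dropLast else acc
        acc' ++ [mapped]
    | none => acc ++ [token]

def clean_g2p_tokens (raw_tokens : List String) : List String :=
  let v := raw_tokens.foldl pvAStep []
  if v ≠ [] ∧ v.getLast? = some "<SPACE>" then v.dropLast else v

-- ===== PORT B =====
def pvBSymbolMap : PySem.Dict String String :=
  PySem.Dict.ofList [(" ", "<SPACE>"), (",", "<COMMA>"), (".", "<PERIOD>"),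
    ("?", "<QUESTION>"), ("!", "<EXCLAMATION>"), ("\n", "<NEWLINE>")]

-- stage 1: the list comprehension (drop IGNORE, remap via dict.get with default, tag)
def pvTagTok (t : String) : Option (String × Bool) :=
  if t ∈ (["'", "\"", "-", ":", ";"] : List String) then none
  else some (pvBSymbolMap.getD t t, (pvBSymbolMap.get? t).isSome)

def pvStage1 (raw : List String) : List (String × Bool) := raw.filterMap pvTagTok

-- stage 2 loop body: state = (emitted, last)
def pvStage2Step (s : List (String × Bool) × Option String) (p : String × Bool) :
    List (String × Bool) × Option String :=
  if p.2 ∧ p.1 = "<SPACE>" ∧ (s.2 = none ∨ s.2 = some "<SPACE>") then s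
  else (s.1 ++ [p], some p.1)

-- stage 3 loop body: state = (result, pending)
def pvStage3Step (s : List String × Option String) (p : String × Bool) :
    List String × Option String :=
  let res := match s.2 with
    | some pendv =>
        if ¬(p.2 ∧ p.1 ∈ ["<COMMA>", "<PERIOD>", "<QUESTION>", "<EXCLAMATION>"])
        then s.1 ++ [pendv] else s.1
    | none => s.1
  if p.1 = "<SPACE>" then (res, some p.1) else (res ++ [p.1], none)

def clean_g2p_tokens_alt (raw_tokens : List String) : List String :=
  let tagged := pvStage1 raw_tokens
  let emitted := (tagged.foldl pvStage2Step ([], none)).1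
  (emitted.foldl pvStage3Step ([], none)).1

-- ===== PRECONDITION & SPEC =====
def Spec_clean_g2p_tokens (raw_tokens : List String) (out : List String) : Prop := out = clean_g2p_tokens_alt raw_tokens
instance (raw_tokens : List String) (out : List String) : Decidable (Spec_clean_g2p_tokens raw_tokens out) := by unfold Spec_clean_g2p_tokens; infer_instance

-- ===== CLAIM (what is proved, stated in full; the proofs are below) =====
def Claim_equal_clean_g2p_tokens : Prop := ∀ (raw_tokens : List String), Dom_clean_g2p_tokens raw_tokens → Spec_clean_g2p_tokens raw_tokens (clean_g2p_tokens raw_tokens)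

-- ===== LEMMAS AND PROOFS =====

-- A's loop body expressed over a stage-1 (remapped, tagged) token
def pvAStepT (acc : List String) (p : String × Bool) : List String :=
  if p.2 then
    if p.1 = "<SPACE>" ∧ (acc = [] ∨ acc.getLast? = some "<SPACE>") then acc
    else
      (if p.1 ∈ ["<COMMA>", "<PERIOD>", "<QUESTION>", "<EXCLAMATION>"]
         ∧ acc ≠ [] ∧ acc.getLast? = some "<SPACE>" then acc.dropLast else acc) ++ [p.1]
  else acc ++ [p.1]

-- stages 2 and 3 fused into one fold: state = (result, pending, last)
def pvFStep (s : List String × Option String × Option String) (p : String × Bool) :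
    List String × Option String × Option String :=
  if p.2 ∧ p.1 = "<SPACE>" ∧ (s.2.2 = none ∨ s.2.2 = some "<SPACE>") then s
  else
    let res := match s.2.1 with
      | some pendv =>
          if ¬(p.2 ∧ p.1 ∈ ["<COMMA>", "<PERIOD>", "<QUESTION>", "<EXCLAMATION>"])
          then s.1 ++ [pendv] else s.1
      | none => s.1
    if p.1 = "<SPACE>" then (res, some p.1, some p.1) else (res ++ [p.1], none, some p.1)

-- each raw token, fed through A's loop body, acts like its tagged image through pvAStepT
theorem pv_step_bridge (acc : List String) (t : String) :
    pvAStep acc t =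
      (match pvTagTok t with
       | none => acc
       | some p => pvAStepT acc p) := by
  unfold pvAStep pvTagTok pvAStepT pvIgnoreList
  have e : pvBSymbolMap = pvSymbolMap := rfl
  rw [e]
  by_cases h : t ∈ (["'", "\"", "-", ":", ";"] : List String)
  · rw [if_pos h, if_pos h]
  · rw [if_neg h, if_neg h]
    cases hm : pvSymbolMap.get? t with
    | none => simp [PySem.Dict.getD, hm]
    | some m => simp [PySem.Dict.getD, hm]

-- A's fold over the raw tokens equals the tagged fold over stage-1 output
theorem pv_fold_bridge (raw : List String) (acc : List String) :
    raw.foldl pvAStep acc = (pvStage1 raw).foldl pvAStepT acc := by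
  induction raw generalizing acc with
  | nil => rfl
  | cons t rest ih =>
    rw [List.foldl_cons, pv_step_bridge]
    have hp : pvStage1 (t :: rest) =
        (match pvTagTok t with
         | none => pvStage1 rest
         | some p => p :: pvStage1 rest) := by
      unfold pvStage1
      rw [List.filterMap_cons]
      cases pvTagTok t <;> rfl
    rw [hp]
    cases pvTagTok t with
    | none => exact ih acc
    | some p => exact ih (pvAStepT acc p)

-- B's staged folds (stage 2 then stage 3) equal the fused fold
theorem pv_fuse (m : List (String × Bool)) (E : List (String × Bool)) (l : Option String) :
    (let s := m.foldl pvStage2Step (E, l)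
     let t := s.1.foldl pvStage3Step ([], none)
     (t.1, t.2, s.2))
    = m.foldl pvFStep
        (let t0 := E.foldl pvStage3Step ([], none); (t0.1, t0.2, l)) := by
  induction m generalizing E l with
  | nil => rfl
  | cons p rest ih =>
    simp only [List.foldl_cons]
    by_cases hc : p.2 ∧ p.1 = "<SPACE>" ∧ (l = none ∨ l = some "<SPACE>")
    · have h2 : pvStage2Step (E, l) p = (E, l) := by
        unfold pvStage2Step; rw [if_pos hc]
      have hf : pvFStep (let t0 := E.foldl pvStage3Step ([], none); (t0.1, t0.2, l)) p
          = (let t0 := E.foldl pvStage3Step ([], none); (t0.1, t0.2, l)) := by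
        unfold pvFStep; rw [if_pos hc]
      rw [h2, hf]; exact ih E l
    · have h2 : pvStage2Step (E, l) p = (E ++ [p], some p.1) := by
        unfold pvStage2Step; rw [if_neg hc]
      have hf : pvFStep (let t0 := E.foldl pvStage3Step ([], none); (t0.1, t0.2, l)) p
          = (let t0 := (E ++ [p]).foldl pvStage3Step ([], none); (t0.1, t0.2, some p.1)) := by
        unfold pvFStep
        rw [if_neg hc]
        simp only [List.foldl_append, List.foldl_cons, List.foldl_nil]
        unfold pvStage3Step
        split_ifs <;> rfl
      rw [h2, hf]; exact ih (E ++ [p]) (some p.1)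

-- main invariant: A's tagged fold from acc = res ++ pending equals the fused fold
theorem pv_main (m : List (String × Bool)) (res : List String) (pend : Option String)
    (hp : ∀ v, pend = some v → v = "<SPACE>")
    (hn : pend = none → res.getLast? ≠ some "<SPACE>") :
    (let acc := res ++ pend.toList
     let f := m.foldl pvFStep (res, pend, acc.getLast?)
     m.foldl pvAStepT acc = f.1 ++ f.2.1.toList
       ∧ (∀ v, f.2.1 = some v → v = "<SPACE>")
       ∧ (f.2.1 = none → f.1.getLast? ≠ some "<SPACE>")) := by
  induction m generalizing res pend with
  | nil => exact ⟨rfl, hp, hn⟩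
  | cons p rest ih =>
    simp only [List.foldl_cons]
    rcases pend with _ | w
    · -- pending = none
      simp only [Option.toList_none, List.append_nil]
      have hns : res.getLast? ≠ some "<SPACE>" := hn rfl
      by_cases hc : p.2 = true ∧ p.1 = "<SPACE>" ∧
          (res.getLast? = none ∨ res.getLast? = some "<SPACE>")
      · -- both sides skip
        have hre : res = [] := by
          rcases hc.2.2 with h | h
          · exact List.getLast?_eq_none_iff.mp h
          · exact absurd h hns
        have hA : pvAStepT res p = res := by
          unfold pvAStepT
          rw [if_pos hc.1, if_pos ⟨hc.2.1, Or.inl hre⟩]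
        have hF : pvFStep (res, none, res.getLast?) p = (res, none, res.getLast?) := by
          simp only [pvFStep]
          rw [if_pos hc]
        rw [hA, hF]
        have := ih res none hp hn
        simpa using this
      · -- both sides emit p.1
        have hA : pvAStepT res p = res ++ [p.1] := by
          unfold pvAStepT
          by_cases hm2 : p.2 = true
          · rw [if_pos hm2, if_neg, if_neg]
            · intro h; exact hns h.2.2
            · intro h
              rcases h.2 with he | hl
              · exact hc ⟨hm2, h.1, Or.inl (by rw [he]; rfl)⟩
              · exact hns hl
          · rw [if_neg hm2]
        have hF : pvFStep (res, none, res.getLast?) p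
            = if p.1 = "<SPACE>" then (res, some p.1, some p.1)
              else (res ++ [p.1], none, some p.1) := by
          simp only [pvFStep]
          rw [if_neg hc]
        rw [hA, hF]
        by_cases hsp : p.1 = "<SPACE>"
        · rw [if_pos hsp]
          have hg : (res ++ [p.1]).getLast? = some p.1 := by simp
          have := ih res (some p.1) (by intro v hv; cases hv; exact hsp)
            (by intro h; cases h)
          simp only [Option.toList_some] at this
          rw [hg] at this
          exact this
        · rw [if_neg hsp]
          have hg : (res ++ [p.1]).getLast? = some p.1 := by simp
          have := ih (res ++ [p.1]) none (by intro v hv; cases hv)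
            (by intro _; rw [hg]; intro h; exact hsp (by injection h))
          simp only [Option.toList_none, List.append_nil] at this
          rw [hg] at this
          exact this
    · -- pending = some w, so w = "<SPACE>"
      have hw : w = "<SPACE>" := hp w rfl
      subst hw
      simp only [Option.toList_some]
      have hgl : (res ++ ["<SPACE>"]).getLast? = some "<SPACE>" := by simp
      by_cases hm2 : p.2 = true ∧ p.1 = "<SPACE>"
      · -- both sides skip
        have hA : pvAStepT (res ++ ["<SPACE>"]) p = res ++ ["<SPACE>"] := by
          unfold pvAStepT
          rw [if_pos hm2.1, if_pos ⟨hm2.2, Or.inr hgl⟩]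
        have hF : pvFStep (res, some "<SPACE>", (res ++ ["<SPACE>"]).getLast?) p
            = (res, some "<SPACE>", (res ++ ["<SPACE>"]).getLast?) := by
          simp only [pvFStep]
          rw [if_pos ⟨hm2.1, hm2.2, Or.inr hgl⟩]
        rw [hA, hF]
        have := ih res (some "<SPACE>") hp (by intro h; cases h)
        simp only [Option.toList_some] at this
        exact this
      · by_cases hpu : p.2 = true ∧ p.1 ∈ ["<COMMA>", "<PERIOD>", "<QUESTION>", "<EXCLAMATION>"]
        · -- mapped punctuation: A pops the space, B never releases it
          have hnsp : p.1 ≠ "<SPACE>" := by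
            intro h
            have h2 := hpu.2
            rw [h] at h2
            simp at h2
          have hA : pvAStepT (res ++ ["<SPACE>"]) p = res ++ [p.1] := by
            unfold pvAStepT
            rw [if_pos hpu.1, if_neg (fun h => hnsp h.1),
              if_pos ⟨hpu.2, by simp, hgl⟩, List.dropLast_concat]
          have hF : pvFStep (res, some "<SPACE>", (res ++ ["<SPACE>"]).getLast?) p
              = (res ++ [p.1], none, some p.1) := by
            simp only [pvFStep]
            rw [if_neg (fun h => hm2 ⟨h.1, h.2.1⟩)]
            rw [if_neg (not_not_intro hpu), if_neg hnsp]
          rw [hA, hF]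
          have hg : (res ++ [p.1]).getLast? = some p.1 := by simp
          have := ih (res ++ [p.1]) none (by intro v hv; cases hv)
            (by intro _; rw [hg]; intro h; exact hnsp (by injection h))
          simp only [Option.toList_none, List.append_nil] at this
          rw [hg] at this
          exact this
        · -- held-back space is released before p
          have hA : pvAStepT (res ++ ["<SPACE>"]) p = (res ++ ["<SPACE>"]) ++ [p.1] := by
            unfold pvAStepT
            by_cases hb2 : p.2 = true
            · rw [if_pos hb2, if_neg, if_neg]
              · intro h; exact hpu ⟨hb2, h.1⟩
              · intro h; exact hm2 ⟨hb2, h.1⟩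
            · rw [if_neg hb2]
          have hF : pvFStep (res, some "<SPACE>", (res ++ ["<SPACE>"]).getLast?) p
              = if p.1 = "<SPACE>" then (res ++ ["<SPACE>"], some p.1, some p.1)
                else ((res ++ ["<SPACE>"]) ++ [p.1], none, some p.1) := by
            simp only [pvFStep]
            rw [if_neg (fun h => hm2 ⟨h.1, h.2.1⟩)]
            rw [if_pos hpu]
          rw [hA, hF]
          by_cases hsp : p.1 = "<SPACE>"
          · rw [if_pos hsp]
            have hg : ((res ++ ["<SPACE>"]) ++ [p.1]).getLast? = some p.1 := by simp
            have := ih (res ++ ["<SPACE>"]) (some p.1) (by intro v hv; cases hv; exact hsp)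
              (by intro h; cases h)
            simp only [Option.toList_some] at this
            rw [hg] at this
            exact this
          · rw [if_neg hsp]
            have hg : (((res ++ ["<SPACE>"]) ++ [p.1])).getLast? = some p.1 := by simp
            have := ih ((res ++ ["<SPACE>"]) ++ [p.1]) none (by intro v hv; cases hv)
              (by intro _; rw [hg]; intro h; exact hsp (by injection h))
            simp only [Option.toList_none, List.append_nil] at this
            rw [hg] at this
            exact this

-- ===== VERDICT (by name: the statement is the Claim_ definition above) =====
theorem clean_g2p_tokens_spec : Claim_equal_clean_g2p_tokens := by
  intro raw _
  unfold Spec_clean_g2p_tokens clean_g2p_tokens clean_g2p_tokens_alt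
  rw [pv_fold_bridge]
  have hb := pv_fuse (pvStage1 raw) [] none
  have hm := pv_main (pvStage1 raw) [] none (by intro v h; cases h) (by intro _; simp)
  simp only [Option.toList_none, List.append_nil, List.foldl_nil,
    List.getLast?_nil] at hb hm
  obtain ⟨h1, h2, h3⟩ := hm
  have ht := congrArg Prod.fst hb
  simp only [] at ht
  rw [h1, ht]
  cases hpd : ((pvStage1 raw).foldl pvFStep ([], none, none)).2.1 with
  | some w =>
    have hw : w = "<SPACE>" := h2 w hpd
    subst hw
    simp
  | none =>
    simp only [Option.toList_none, List.append_nil]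
    rw [if_neg]
    intro h
    exact h3 hpd h.2
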